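-- pv_equiv track=rewrite | github.com/Enormousegg/RoughSetSolver | roughSolver.py | GetPositive
-- ===== SOURCE A (Python) =====
-- def GetPositive(ConditionAttribIND,DecisionAttribIND):
--     ans = list()
--     count = 0
--     for x in ConditionAttribIND:
--         if(len(x)==1):
--             ans.extend(x)
--             count += 1
--             continue
--         for y in DecisionAttribIND:
--             if(set(x)<set(y)):
--                 ans.extend(x)
--                 break
--     return ans
-- ===== SOURCE B (Python) =====
-- def GetPositive(ConditionAttribIND, DecisionAttribIND):
--     # Index each element to the decision classes containing it, then test each
--     # condition class against only the classes its own elements belong to.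
--     index = {}   # element -> list of indices of decision classes whose set contains it
--     sizes = []   # distinct-element count of each decision class
--     for j, y in enumerate(DecisionAttribIND):
--         sizes.append(len(set(y)))
--         for e in y:
--             lst = index.setdefault(e, [])
--             if not lst or lst[-1] != j:
--                 lst.append(j)
--     ans = []
--     for x in ConditionAttribIND:
--         if len(x) == 1:
--             ans.extend(x)
--             continue
--         if not x:
--             continue
--         cand = index.get(x[0], [])
--         for e in x[1:]:
--             js = index.get(e, [])
--             cand = [j for j in cand if j in js]
--         nx = len(set(x))
--         if any(sizes[j] > nx for j in cand):
--             ans.extend(x)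
--     return ans
-- ===== Notes on version B (the rewrite author's own statement) =====
-- stated objective: faster
-- what changed: B builds a dict index from elements to the decision classes containing them once, then decides each condition class by intersecting its elements' index lists and a size comparison, instead of rebuilding both sets and testing proper inclusion for every (condition, decision) pair.
import Mathlib
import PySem

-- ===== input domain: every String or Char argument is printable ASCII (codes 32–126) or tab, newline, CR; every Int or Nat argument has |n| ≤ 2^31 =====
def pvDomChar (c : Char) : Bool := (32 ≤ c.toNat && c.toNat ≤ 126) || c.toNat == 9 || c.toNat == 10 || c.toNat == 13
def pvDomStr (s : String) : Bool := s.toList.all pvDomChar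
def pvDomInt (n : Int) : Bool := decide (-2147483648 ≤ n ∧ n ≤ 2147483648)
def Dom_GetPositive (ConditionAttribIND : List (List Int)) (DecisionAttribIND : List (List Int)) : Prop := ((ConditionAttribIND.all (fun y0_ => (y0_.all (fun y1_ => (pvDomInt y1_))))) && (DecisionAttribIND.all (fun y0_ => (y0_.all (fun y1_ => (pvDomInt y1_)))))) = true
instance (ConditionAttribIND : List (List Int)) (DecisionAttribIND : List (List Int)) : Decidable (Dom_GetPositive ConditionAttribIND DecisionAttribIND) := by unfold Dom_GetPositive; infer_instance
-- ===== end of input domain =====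

-- B replaces A's all-pairs "set(x) < set(y)" scan by a dict index from elements to the
-- decision classes containing them (objective: faster).

-- ===== PORT A =====
-- set(x) < set(y): proper subset, i.e. issubset and not equal
def pvLt (x y : List Int) : Bool :=
  PySem.Set.issubset (PySem.Set.ofList x) (PySem.Set.ofList y) &&
  !(PySem.Set.equal (PySem.Set.ofList x) (PySem.Set.ofList y))

-- inner 'for y in DecisionAttribIND: … break'
def pvAInner (ans x : List Int) : List (List Int) → List Int
  | [] => ans
  | y :: ys => if pvLt x y then ans ++ x else pvAInner ans x ys

def GetPositive (ConditionAttribIND : List (List Int)) (DecisionAttribIND : List (List Int)) : List Int :=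
  (ConditionAttribIND.foldl (fun st x =>
      if x.length == 1 then (st.1 ++ x, st.2 + 1)
      else (pvAInner st.1 x DecisionAttribIND, st.2))
    (([] : List Int), (0 : Int))).1

-- ===== PORT B =====
-- inner 'for e in y: lst = index.setdefault(e, []); if not lst or lst[-1] != j: lst.append(j)'
def pvAddClass (j : Int) (d : PySem.Dict Int (List Int)) (y : List Int) : PySem.Dict Int (List Int) :=
  y.foldl (fun d e =>
    let lst := d.getD e []
    if lst = [] ∨ lst.getLast? ≠ some j then d.insert e (lst ++ [j]) else d) d

-- 'for j, y in enumerate(DecisionAttribIND): sizes.append(len(set(y))); …'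
def pvBIndex (D : List (List Int)) : PySem.Dict Int (List Int) × List Int :=
  (PySem.List.enumerate D).foldl
    (fun st p => (pvAddClass p.1 st.1 p.2, st.2 ++ [PySem.Set.len (PySem.Set.ofList p.2)]))
    (PySem.Dict.empty, [])

def GetPositive_alt (ConditionAttribIND : List (List Int)) (DecisionAttribIND : List (List Int)) : List Int :=
  let idx := pvBIndex DecisionAttribIND
  ConditionAttribIND.foldl (fun ans x =>
    if x.length == 1 then ans ++ x
    else
      match x with
      | [] => ans                         -- 'if not x: continue'
      | e0 :: rest =>                     -- x[0], x[1:]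
        let cand := rest.foldl (fun cand e => cand.filter (fun j => (idx.1.getD e []).contains j))
                      (idx.1.getD e0 [])
        let nx := PySem.Set.len (PySem.Set.ofList (e0 :: rest))
        if cand.any (fun j => PySem.List.pyGetD idx.2 j 0 > nx) then ans ++ (e0 :: rest) else ans) []

-- ===== PRECONDITION & SPEC =====
def Spec_GetPositive (ConditionAttribIND : List (List Int)) (DecisionAttribIND : List (List Int)) (out : List Int) : Prop := out = GetPositive_alt ConditionAttribIND DecisionAttribIND
instance (ConditionAttribIND : List (List Int)) (DecisionAttribIND : List (List Int)) (out : List Int) : Decidable (Spec_GetPositive ConditionAttribIND DecisionAttribIND out) := by unfold Spec_GetPositive; infer_instance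

-- ===== CLAIM (what is proved, stated in full; the proofs are below) =====
def Claim_equal_GetPositive : Prop := ∀ (ConditionAttribIND : List (List Int)) (DecisionAttribIND : List (List Int)), Dom_GetPositive ConditionAttribIND DecisionAttribIND → Spec_GetPositive ConditionAttribIND DecisionAttribIND (GetPositive ConditionAttribIND DecisionAttribIND)

-- ===== LEMMAS AND PROOFS =====

-- A's inner loop returns ans ++ x iff some decision class properly contains set(x)
theorem pvAInner_eq (ans x : List Int) (D : List (List Int)) :
    pvAInner ans x D = if D.any (fun y => pvLt x y) then ans ++ x else ans := by
  induction D with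
  | nil => simp [pvAInner]
  | cons y ys ih =>
    by_cases h : pvLt x y = true <;> simp [pvAInner, h, ih]

-- on nodup lists, "subset and not extensionally equal" is a strict length comparison
theorem pv_proper_iff (sx sy : List Int) (hx : sx.Nodup) (hy : sy.Nodup)
    (hsub : ∀ e ∈ sx, e ∈ sy) :
    (¬ ∀ e, e ∈ sx ↔ e ∈ sy) ↔ sx.length < sy.length := by
  have hsp : List.Subperm sx sy := hx.subperm hsub
  constructor
  · intro hne
    rcases lt_or_eq_of_le hsp.length_le with h | h
    · exact h
    · exact absurd (fun e => (hsp.perm_of_length_le (le_of_eq h.symm)).mem_iff) hne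
  · intro hlt hall
    have h2 : List.Subperm sy sx := hy.subperm (fun e he => (hall e).mpr he)
    have := h2.length_le
    omega

theorem pvLt_iff (x y : List Int) :
    pvLt x y = true ↔ (∀ e ∈ x, e ∈ y) ∧
      (PySem.Set.ofList x).length < (PySem.Set.ofList y).length := by
  unfold pvLt
  simp only [Bool.and_eq_true, Bool.not_eq_eq_eq_not, Bool.not_true]
  constructor
  · rintro ⟨h1, h2⟩
    rw [PySem.Set.issubset_iff] at h1
    refine ⟨fun e he => by simpa [PySem.Set.mem_ofList] using h1 e (by simpa [PySem.Set.mem_ofList] using he), ?_⟩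
    rw [← pv_proper_iff _ _ (PySem.Set.nodup_ofList x) (PySem.Set.nodup_ofList y) h1]
    intro hall
    have : (PySem.Set.ofList x).equal (PySem.Set.ofList y) = true := (PySem.Set.equal_iff _ _).mpr hall
    simp [this] at h2
  · rintro ⟨h1, h2⟩
    have hsub : ∀ e ∈ PySem.Set.ofList x, e ∈ PySem.Set.ofList y := by
      intro e he; rw [PySem.Set.mem_ofList] at *; exact h1 e he
    refine ⟨(PySem.Set.issubset_iff _ _).mpr hsub, ?_⟩
    have := (pv_proper_iff _ _ (PySem.Set.nodup_ofList x) (PySem.Set.nodup_ofList y) hsub).mpr h2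
    rcases h : (PySem.Set.ofList x).equal (PySem.Set.ofList y) with _ | _
    · rfl
    · exact absurd ((PySem.Set.equal_iff _ _).mp h) this

-- membership in the per-class inner dict fold
theorem pvAddClass_mem (j : Int) (d : PySem.Dict Int (List Int)) (y : List Int) (e j' : Int) :
    j' ∈ (pvAddClass j d y).getD e [] ↔ j' ∈ d.getD e [] ∨ (j' = j ∧ e ∈ y) := by
  induction y generalizing d with
  | nil => simp [pvAddClass]
  | cons a ys ih =>
    show j' ∈ (pvAddClass j (if d.getD a [] = [] ∨ (d.getD a []).getLast? ≠ some j
        then d.insert a (d.getD a [] ++ [j]) else d) ys).getD e [] ↔ _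
    rw [ih]
    by_cases hg : d.getD a [] = [] ∨ (d.getD a []).getLast? ≠ some j
    · rw [if_pos hg, PySem.Dict.getD_insert]
      by_cases he : e = a
      · subst he; simp [List.mem_append]; tauto
      · simp [he, List.mem_cons]
    · rw [if_neg hg]
      simp only [not_or, ne_eq, not_not] at hg
      have hjmem : j ∈ d.getD a [] := List.mem_of_getLast? hg.2
      by_cases he : e = a
      · subst he; simp [List.mem_cons]
        constructor
        · tauto
        · rintro (h | ⟨rfl, (h | h)⟩) <;> tauto
      · simp [List.mem_cons]
        constructor
        · tauto
        · rintro (h | ⟨rfl, (rfl | h)⟩) <;> tauto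

-- membership in the dict built by the outer fold of pvBIndex, for any start state
theorem pvBIndex_fold_mem (L : List (Int × List Int)) (d : PySem.Dict Int (List Int))
    (s : List Int) (e j : Int) :
    j ∈ (L.foldl (fun st p => (pvAddClass p.1 st.1 p.2, st.2 ++ [PySem.Set.len (PySem.Set.ofList p.2)])) (d, s)).1.getD e []
      ↔ j ∈ d.getD e [] ∨ ∃ p ∈ L, p.1 = j ∧ e ∈ p.2 := by
  induction L generalizing d s with
  | nil => simp
  | cons p ps ih =>
    simp only [List.foldl_cons]
    rw [ih, pvAddClass_mem]
    simp only [List.mem_cons]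
    constructor
    · rintro ((h | ⟨rfl, hm⟩) | ⟨q, hq, h1, h2⟩)
      · tauto
      · exact Or.inr ⟨p, Or.inl rfl, rfl, hm⟩
      · exact Or.inr ⟨q, Or.inr hq, h1, h2⟩
    · rintro (h | ⟨q, (rfl | hq), h1, h2⟩)
      · tauto
      · exact Or.inl (Or.inr ⟨h1.symm, h2⟩)
      · exact Or.inr ⟨q, hq, h1, h2⟩

-- the sizes list accumulated by the outer fold of pvBIndex
theorem pvBIndex_fold_sizes (L : List (Int × List Int)) (d : PySem.Dict Int (List Int))
    (s : List Int) :
    (L.foldl (fun st p => (pvAddClass p.1 st.1 p.2, st.2 ++ [PySem.Set.len (PySem.Set.ofList p.2)])) (d, s)).2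
      = s ++ L.map (fun p => PySem.Set.len (PySem.Set.ofList p.2)) := by
  induction L generalizing d s with
  | nil => simp
  | cons p ps ih => simp only [List.foldl_cons]; rw [ih]; simp

theorem pv_mem_enumerate (xs : List (List Int)) (s : Int) (p : Int × List Int) :
    p ∈ PySem.List.enumerate xs s ↔ ∃ k : Nat, ∃ h : k < xs.length, p = (s + k, xs[k]) := by
  induction xs generalizing s with
  | nil => simp [PySem.List.enumerate]
  | cons a as ih =>
    rw [PySem.List.enumerate_cons]
    simp only [List.mem_cons, ih]
    constructor
    · rintro (rfl | ⟨k, hk, rfl⟩)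
      · exact ⟨0, by simp, by simp⟩
      · refine ⟨k + 1, by simp only [List.length_cons]; omega, ?_⟩
        simp only [List.getElem_cons_succ]
        congr 1
        push_cast
        ring
    · rintro ⟨k, hk, rfl⟩
      cases k with
      | zero => left; simp
      | succ k =>
        right
        refine ⟨k, by simp only [List.length_cons] at hk; omega, ?_⟩
        simp only [List.getElem_cons_succ]
        congr 1
        push_cast
        ring

theorem pvBIndex_mem (D : List (List Int)) (e j : Int) :
    j ∈ (pvBIndex D).1.getD e [] ↔ ∃ k : Nat, ∃ h : k < D.length, j = (k : Int) ∧ e ∈ D[k] := by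
  unfold pvBIndex
  rw [pvBIndex_fold_mem]
  simp only [PySem.Dict.getD_empty, List.not_mem_nil, false_or]
  constructor
  · rintro ⟨p, hp, h1, h2⟩
    rcases (pv_mem_enumerate D 0 p).mp hp with ⟨k, hk, rfl⟩
    exact ⟨k, hk, by simpa using h1.symm, h2⟩
  · rintro ⟨k, hk, rfl, he⟩
    refine ⟨((k : Int), D[k]), (pv_mem_enumerate D 0 _).mpr ⟨k, hk, by simp⟩, rfl, he⟩

theorem pvBIndex_sizes (D : List (List Int)) :
    (pvBIndex D).2 = D.map (fun y => PySem.Set.len (PySem.Set.ofList y)) := by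
  unfold pvBIndex
  rw [pvBIndex_fold_sizes]
  have : (fun (p : Int × List Int) => PySem.Set.len (PySem.Set.ofList p.2))
       = (fun y => PySem.Set.len (PySem.Set.ofList y)) ∘ (fun (p : Int × List Int) => p.2) := rfl
  rw [this, ← List.map_map, PySem.List.map_snd_enumerate]
  simp

-- the candidate-intersection loop keeps exactly the indices present in every element's list
theorem pv_cand_mem (idx : PySem.Dict Int (List Int)) (rest : List Int) (c0 : List Int) (j : Int) :
    j ∈ rest.foldl (fun cand e => cand.filter (fun j => (idx.getD e []).contains j)) c0
      ↔ j ∈ c0 ∧ ∀ e ∈ rest, j ∈ idx.getD e [] := by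
  induction rest generalizing c0 with
  | nil => simp
  | cons a as ih =>
    simp only [List.foldl_cons]
    rw [ih]
    simp [List.mem_filter, List.mem_cons]
    tauto

-- per-class equivalence of the two qualification tests (x = e0 :: rest nonempty)
theorem pv_cond_iff (D : List (List Int)) (e0 : Int) (rest : List Int) :
    (D.any (fun y => pvLt (e0 :: rest) y) = true)
      ↔ ((rest.foldl (fun cand e => cand.filter (fun j => ((pvBIndex D).1.getD e []).contains j))
            ((pvBIndex D).1.getD e0 [])).any
          (fun j => PySem.List.pyGetD (pvBIndex D).2 j 0 > PySem.Set.len (PySem.Set.ofList (e0 :: rest))) = true) := by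
  rw [List.any_eq_true, List.any_eq_true]
  constructor
  · rintro ⟨y, hy, hlt⟩
    rcases List.mem_iff_getElem.mp hy with ⟨k, hk, rfl⟩
    rcases (pvLt_iff (e0 :: rest) _).mp hlt with ⟨hsub, hlen⟩
    refine ⟨(k : Int), ?_, ?_⟩
    · rw [pv_cand_mem]
      exact ⟨(pvBIndex_mem D e0 k).mpr ⟨k, hk, rfl, hsub e0 (by simp)⟩,
             fun e he => (pvBIndex_mem D e k).mpr ⟨k, hk, rfl, hsub e (by simp [he])⟩⟩
    · rw [pvBIndex_sizes, PySem.List.pyGetD_natCast]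
      rw [List.getD_eq_getElem _ _ (by simpa using hk)]
      simp only [List.getElem_map, PySem.Set.len]
      simp only [decide_eq_true_eq, gt_iff_lt]
      exact_mod_cast hlen
  · rintro ⟨j, hj, hgt⟩
    rw [pv_cand_mem] at hj
    rcases (pvBIndex_mem D e0 j).mp hj.1 with ⟨k, hk, rfl, he0⟩
    refine ⟨D[k], List.getElem_mem hk, ?_⟩
    rw [pvLt_iff]
    have hall : ∀ e ∈ e0 :: rest, e ∈ D[k] := by
      intro e he
      rcases List.mem_cons.mp he with rfl | hr
      · exact he0
      · rcases (pvBIndex_mem D e k).mp (hj.2 e hr) with ⟨k', hk', hkk, he'⟩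
        have : k' = k := by exact_mod_cast hkk.symm
        subst this; exact he'
    refine ⟨hall, ?_⟩
    rw [pvBIndex_sizes, PySem.List.pyGetD_natCast] at hgt
    rw [List.getD_eq_getElem _ _ (by simpa using hk)] at hgt
    simp only [List.getElem_map, PySem.Set.len, gt_iff_lt, decide_eq_true_eq] at hgt
    exact_mod_cast hgt

-- the two main folds agree for any accumulator and count
theorem pv_fold_eq (Dn : List (List Int)) (C : List (List Int)) (ans : List Int) (c : Int) :
    (C.foldl (fun st x =>
        if x.length == 1 then (st.1 ++ x, st.2 + 1)
        else (pvAInner st.1 x Dn, st.2)) (ans, c)).1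
    = C.foldl (fun ans x =>
        if x.length == 1 then ans ++ x
        else
          match x with
          | [] => ans
          | e0 :: rest =>
            let cand := rest.foldl (fun cand e => cand.filter (fun j => ((pvBIndex Dn).1.getD e []).contains j))
                          ((pvBIndex Dn).1.getD e0 [])
            let nx := PySem.Set.len (PySem.Set.ofList (e0 :: rest))
            if cand.any (fun j => PySem.List.pyGetD (pvBIndex Dn).2 j 0 > nx) then ans ++ (e0 :: rest) else ans) ans := by
  induction C generalizing ans c with
  | nil => rfl
  | cons x xs ih =>
    simp only [List.foldl_cons]
    by_cases h1 : (x.length == 1) = true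
    · simp only [h1, if_pos]
      exact ih _ _
    · simp only [h1, Bool.false_eq_true, if_false] at *
      rw [ih]
      congr 1
      cases x with
      | nil => simp [pvAInner_eq]
      | cons e0 rest =>
        rw [pvAInner_eq]
        have hb : Dn.any (fun y => pvLt (e0 :: rest) y)
            = ((rest.foldl (fun cand e => cand.filter (fun j => ((pvBIndex Dn).1.getD e []).contains j))
                  ((pvBIndex Dn).1.getD e0 [])).any
                (fun j => PySem.List.pyGetD (pvBIndex Dn).2 j 0 > PySem.Set.len (PySem.Set.ofList (e0 :: rest)))) := by
          rw [Bool.eq_iff_iff]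
          exact pv_cond_iff Dn e0 rest
        rw [hb]

-- ===== VERDICT (by name: the statement is the Claim_ definition above) =====
theorem GetPositive_spec : Claim_equal_GetPositive := by
  unfold Claim_equal_GetPositive
  intro C D _
  unfold Spec_GetPositive GetPositive GetPositive_alt
  exact pv_fold_eq D C [] 0
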